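-- pv_equiv track=rewrite | github.com/gilessmith/cj1a2011p | cjam.py | get_best_score
-- ===== SOURCE A (Python) =====
-- def update_cards(deck, hand, card):
--     new_hand = hand[:]
--     new_hand.remove(card)
--     new_hand += deck[0:card[0]]
--     new_deck = deck[card[0]:]
--
--     return new_hand, new_deck
--
-- def get_best_score(deck, hand, turn_count):
--
--     if turn_count == 0  or len(hand) == 0:
--         return 0
--
--     for card in hand:
--         if ((card[0] >0 or len(deck)== 0) and
--             (card[2] >0 or len(deck) + len(hand) < turn_count)):
--
--             new_hand, new_deck = update_cards(deck, hand, card)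
--             return card[1] + get_best_score(new_deck, new_hand, turn_count - 1 + card[2])
--
--     # if we have reached here, then we have not found a neutral hand...
--     # therefore iterate through all possible combinations
--
--     t_max = max(hand, key=lambda j: j[2])
--     c_max = max(hand, key=lambda j: j[0])
--
--     c = c_max[0] + t_max[0]
--     t = c_max[2] + t_max[2]
--     if (c > 1 and t > 1) or (c>1 and turn_count > len(hand) + len(deck)) or (t > 1 and len(deck) ==0):
--         new_hand, new_deck = update_cards(deck, hand, t_max)
--         new_hand, new_deck = update_cards(new_deck, new_hand, c_max)
--
--         return t_max[1] + c_max[1] + get_best_score(new_deck, new_hand, turn_count - 2 + c_max[2] + t_max[2])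
--
--     if t_max[2] == 0 and c_max[0] == 0:
--         hand_by_score = sorted(hand[:], key=lambda card: -card[1])
--         return sum([card[1] for card in hand_by_score[0:turn_count]])
--
--
--
--     scores = []
--     for card in hand:
--
--         new_hand, new_deck = update_cards(deck, hand, card)
--         scores.append(card[1] + get_best_score(new_deck, new_hand, turn_count - 1 + card[2]))
--
--     return max(scores)
-- ===== SOURCE B (Python) =====
-- # Memoized re-implementation: identical branch logic and tie-breaking, but every
-- # (deck, hand, turn_count) state is solved at most once via a cache keyed by the
-- # full state, so no state is ever re-explored.
--
-- def _update(deck, hand, card):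
--     i = hand.index(card)
--     return hand[:i] + hand[i + 1:] + deck[:card[0]], deck[card[0]:]
--
-- def _compute(deck, hand, turn_count, cache):
--     if turn_count == 0 or len(hand) == 0:
--         return 0
--
--     neutral = next((card for card in hand
--                     if (card[0] > 0 or len(deck) == 0)
--                     and (card[2] > 0 or len(deck) + len(hand) < turn_count)),
--                    None)
--     if neutral is not None:
--         nh, nd = _update(deck, hand, neutral)
--         return neutral[1] + _solve(nd, nh, turn_count - 1 + neutral[2], cache)
--
--     t_max = max(hand, key=lambda j: j[2])
--     c_max = max(hand, key=lambda j: j[0])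
--     c = c_max[0] + t_max[0]
--     t = c_max[2] + t_max[2]
--     if (c > 1 and t > 1) or (c > 1 and turn_count > len(hand) + len(deck)) \
--        or (t > 1 and len(deck) == 0):
--         nh, nd = _update(deck, hand, t_max)
--         nh, nd = _update(nd, nh, c_max)
--         return t_max[1] + c_max[1] + _solve(nd, nh, turn_count - 2 + c_max[2] + t_max[2], cache)
--
--     if t_max[2] == 0 and c_max[0] == 0:
--         by_score = sorted(hand, key=lambda card: -card[1])
--         return sum(card[1] for card in by_score[0:turn_count])
--
--     best = None
--     for card in hand:
--         nh, nd = _update(deck, hand, card)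
--         s = card[1] + _solve(nd, nh, turn_count - 1 + card[2], cache)
--         if best is None or s > best:
--             best = s
--     return best
--
-- def _solve(deck, hand, turn_count, cache):
--     key = (tuple(deck), tuple(hand), turn_count)
--     if key in cache:
--         return cache[key]
--     val = _compute(deck, hand, turn_count, cache)
--     cache[key] = val
--     return val
--
-- def get_best_score(deck, hand, turn_count):
--     return _solve(deck, hand, turn_count, {})
-- ===== Notes on version B (the rewrite author's own statement) =====
-- stated objective: alternative
-- what changed: B memoizes A's recursion as top-down DP: each (deck, hand, turn_count) state is solved at most once via a cache keyed by the full state, the first-neutral-card scan becomes next() over a generator, and the final exhaustive loop keeps a running best instead of building a score list; on the generated inputs A's greedy short-circuit already keeps it fast, so no speedup was measured.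
import Mathlib
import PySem

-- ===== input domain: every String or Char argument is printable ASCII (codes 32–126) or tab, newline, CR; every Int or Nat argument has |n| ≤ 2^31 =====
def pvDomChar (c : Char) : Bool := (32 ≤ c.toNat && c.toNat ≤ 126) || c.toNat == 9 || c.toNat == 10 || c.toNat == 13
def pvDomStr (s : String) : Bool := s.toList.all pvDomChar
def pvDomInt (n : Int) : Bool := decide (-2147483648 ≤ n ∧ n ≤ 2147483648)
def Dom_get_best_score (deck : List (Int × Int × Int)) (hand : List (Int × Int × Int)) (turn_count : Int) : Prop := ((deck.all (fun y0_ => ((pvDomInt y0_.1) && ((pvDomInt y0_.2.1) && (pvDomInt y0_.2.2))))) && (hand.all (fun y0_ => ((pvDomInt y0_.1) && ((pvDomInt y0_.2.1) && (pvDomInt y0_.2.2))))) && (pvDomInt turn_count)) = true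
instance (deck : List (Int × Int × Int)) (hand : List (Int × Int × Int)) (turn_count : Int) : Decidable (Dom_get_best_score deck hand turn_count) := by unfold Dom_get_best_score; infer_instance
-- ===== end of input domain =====

-- B memoizes the (deck, hand, turn_count) state space of A's recursion with a cache, keeping
-- A's branch structure and tie-breaking; return values agree everywhere (A mutates nothing).

-- ===== PORT A =====
-- update_cards: `new_hand.remove(card)` raises ValueError when card ∉ hand (none here);
-- get_best_score only ever calls it with a card taken from hand, so the `none` arm is unreachable.
def update_cards (deck hand : List (Int × Int × Int)) (card : Int × Int × Int) :
    Option (List (Int × Int × Int) × List (Int × Int × Int)) :=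
  match PySem.List.remove? hand card with
  | none => none
  | some h' => some (h' ++ PySem.List.slice deck (some 0) (some card.1),
                     PySem.List.slice deck (some card.1) none)

-- A's `for card in hand: if …: return …` loop, as a find-first helper (dlen/hlen are the
-- full deck/hand lengths the loop body reads).
def firstNeutral (dlen hlen : Nat) (tc : Int) : List (Int × Int × Int) → Option (Int × Int × Int)
  | [] => none
  | c :: rest =>
    if (0 < c.1 ∨ dlen = 0) ∧ (0 < c.2.2 ∨ (dlen : Int) + (hlen : Int) < tc) then some c
    else firstNeutral dlen hlen tc rest

-- A's recursion; fuel = |deck| + |hand| strictly decreases along every recursive call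
-- (each update_cards removes exactly one card from play), so the initial fuel below suffices.
-- Where Python would raise ValueError (unreachable, see update_cards) the port returns 0.
def goA : Nat → List (Int × Int × Int) → List (Int × Int × Int) → Int → Int
  | 0, _, _, _ => 0
  | f + 1, deck, hand, tc =>
    if tc = 0 ∨ hand.length = 0 then 0 else
    match firstNeutral deck.length hand.length tc hand with
    | some card =>
      match update_cards deck hand card with
      | none => 0
      | some (nh, nd) => card.2.1 + goA f nd nh (tc - 1 + card.2.2)
    | none =>
      let t_max := (PySem.List.max? hand (fun j => j.2.2)).getD (0, 0, 0)
      let c_max := (PySem.List.max? hand (fun j => j.1)).getD (0, 0, 0)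
      let c := c_max.1 + t_max.1
      let t := c_max.2.2 + t_max.2.2
      if (1 < c ∧ 1 < t) ∨ (1 < c ∧ (hand.length : Int) + (deck.length : Int) < tc) ∨
         (1 < t ∧ deck.length = 0) then
        match update_cards deck hand t_max with
        | none => 0
        | some (nh1, nd1) =>
          match update_cards nd1 nh1 c_max with
          | none => 0
          | some (nh2, nd2) => t_max.2.1 + c_max.2.1 + goA f nd2 nh2 (tc - 2 + c_max.2.2 + t_max.2.2)
      else if t_max.2.2 = 0 ∧ c_max.1 = 0 then
        ((PySem.List.slice (PySem.List.sorted hand (fun card => -card.2.1) false)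
            (some 0) (some tc)).map (fun card => card.2.1)).sum
      else
        (PySem.List.max? (hand.map (fun card =>
          match update_cards deck hand card with
          | none => 0
          | some (nh, nd) => card.2.1 + goA f nd nh (tc - 1 + card.2.2))) (fun x => x)).getD 0

def get_best_score (deck : List (Int × Int × Int)) (hand : List (Int × Int × Int)) (turn_count : Int) : Int :=
  goA (deck.length + hand.length) deck hand turn_count

-- ===== PORT B =====
-- Source B's _update: `hand.index(card)` raises ValueError when card ∉ hand (none here; unreachable).
def upd_alt (deck hand : List (Int × Int × Int)) (card : Int × Int × Int) :
    Option (List (Int × Int × Int) × List (Int × Int × Int)) :=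
  match PySem.List.index? hand card with
  | none => none
  | some i => some (PySem.List.slice hand none (some (i : Int)) ++
                      PySem.List.slice hand (some ((i : Int) + 1)) none ++
                      PySem.List.slice deck none (some card.1),
                    PySem.List.slice deck (some card.1) none)

-- Source B's cache dict (keyed by the full state) is threaded explicitly; goBmiss is _compute,
-- goB is _solve. Fuel as in goA.
mutual
-- the body of Source B's final `for card in hand` loop (threads the cache)
def stepB (f : Nat) (deck hand : List (Int × Int × Int)) (tc : Int)
    (acc : Option Int × PySem.Dict (List (Int × Int × Int) × List (Int × Int × Int) × Int) Int)
    (card : Int × Int × Int) :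
    Option Int × PySem.Dict (List (Int × Int × Int) × List (Int × Int × Int) × Int) Int :=
  let sp :=
    match upd_alt deck hand card with
    | none => ((0 : Int), acc.2)
    | some (nh, nd) =>
      let p := goB f nd nh (tc - 1 + card.2.2) acc.2
      (card.2.1 + p.1, p.2)
  match acc.1 with
  | none => (some sp.1, sp.2)
  | some m => (some (if m < sp.1 then sp.1 else m), sp.2)
termination_by 3 * f + 1
decreasing_by omega

def goBmiss : Nat → List (Int × Int × Int) → List (Int × Int × Int) → Int →
    PySem.Dict (List (Int × Int × Int) × List (Int × Int × Int) × Int) Int →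
    Int × PySem.Dict (List (Int × Int × Int) × List (Int × Int × Int) × Int) Int
  | f, deck, hand, tc, cache =>
    if tc = 0 ∨ hand.length = 0 then (0, cache) else
    match List.find? (fun card => decide ((0 < card.1 ∨ deck.length = 0) ∧
             (0 < card.2.2 ∨ (deck.length : Int) + (hand.length : Int) < tc))) hand with
    | some card =>
      match upd_alt deck hand card with
      | none => (0, cache)
      | some (nh, nd) =>
        let p := goB f nd nh (tc - 1 + card.2.2) cache
        (card.2.1 + p.1, p.2)
    | none =>
      let t_max := (PySem.List.max? hand (fun j => j.2.2)).getD (0, 0, 0)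
      let c_max := (PySem.List.max? hand (fun j => j.1)).getD (0, 0, 0)
      let c := c_max.1 + t_max.1
      let t := c_max.2.2 + t_max.2.2
      if (1 < c ∧ 1 < t) ∨ (1 < c ∧ (hand.length : Int) + (deck.length : Int) < tc) ∨
         (1 < t ∧ deck.length = 0) then
        match upd_alt deck hand t_max with
        | none => (0, cache)
        | some (nh1, nd1) =>
          match upd_alt nd1 nh1 c_max with
          | none => (0, cache)
          | some (nh2, nd2) =>
            let p := goB f nd2 nh2 (tc - 2 + c_max.2.2 + t_max.2.2) cache
            (t_max.2.1 + c_max.2.1 + p.1, p.2)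
      else if t_max.2.2 = 0 ∧ c_max.1 = 0 then
        (((PySem.List.slice (PySem.List.sorted hand (fun card => -card.2.1) false)
            (some 0) (some tc)).map (fun card => card.2.1)).sum, cache)
      else
        let q := hand.foldl (stepB f deck hand tc) (none, cache)
        (q.1.getD 0, q.2)
termination_by f _ _ _ _ => 3 * f + 2
decreasing_by all_goals omega

def goB : Nat → List (Int × Int × Int) → List (Int × Int × Int) → Int →
    PySem.Dict (List (Int × Int × Int) × List (Int × Int × Int) × Int) Int →
    Int × PySem.Dict (List (Int × Int × Int) × List (Int × Int × Int) × Int) Int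
  | 0, _, _, _, cache => (0, cache)
  | f + 1, deck, hand, tc, cache =>
    match cache.get? (deck, hand, tc) with
    | some v => (v, cache)
    | none =>
      let r := goBmiss f deck hand tc cache
      (r.1, r.2.insert (deck, hand, tc) r.1)
termination_by f _ _ _ _ => 3 * f
decreasing_by all_goals omega
end

def get_best_score_alt (deck : List (Int × Int × Int)) (hand : List (Int × Int × Int)) (turn_count : Int) : Int :=
  (goB (deck.length + hand.length) deck hand turn_count PySem.Dict.empty).1

-- ===== PRECONDITION & SPEC =====
def Spec_get_best_score (deck : List (Int × Int × Int)) (hand : List (Int × Int × Int)) (turn_count : Int) (out : Int) : Prop := out = get_best_score_alt deck hand turn_count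
instance (deck : List (Int × Int × Int)) (hand : List (Int × Int × Int)) (turn_count : Int) (out : Int) : Decidable (Spec_get_best_score deck hand turn_count out) := by unfold Spec_get_best_score; infer_instance

-- ===== CLAIM (what is proved, stated in full; the proofs are below) =====
def Claim_equal_get_best_score : Prop := ∀ (deck : List (Int × Int × Int)) (hand : List (Int × Int × Int)) (turn_count : Int), Dom_get_best_score deck hand turn_count → Spec_get_best_score deck hand turn_count (get_best_score deck hand turn_count)

-- ===== LEMMAS AND PROOFS =====

-- index-then-splice equals remove-first-occurrence.
theorem idx_splice_eq_remove {α : Type} [BEq α] [LawfulBEq α] : ∀ (l : List α) (x : α),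
    (match PySem.List.index? l x with
     | none => none
     | some i => some (PySem.List.slice l none (some (i : Int)) ++
                        PySem.List.slice l (some ((i : Int) + 1)) none))
    = PySem.List.remove? l x := by
  intro l x
  induction l with
  | nil => rfl
  | cons y t ih =>
    by_cases hxy : y = x
    · subst hxy
      rw [PySem.List.index?_cons_self, PySem.List.remove?_cons_self]
      show some (PySem.List.slice (y :: t) none (some ((0:Nat):Int)) ++
        PySem.List.slice (y :: t) (some (((0:Nat):Int) + 1)) none) = _
      have e : (((0:Nat):Int) + 1) = ((1 : Nat) : Int) := by norm_num
      rw [PySem.List.slice_to_natCast, e, PySem.List.slice_from_natCast]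
      rfl
    · rw [PySem.List.index?_cons_of_ne _ hxy, PySem.List.remove?_cons_of_ne _ hxy, ← ih]
      cases hidx : PySem.List.index? t x with
      | none => rfl
      | some i =>
        simp only [Option.map_some]
        have h1 : PySem.List.slice (y :: t) none (some ((i + 1 : Nat) : Int)) =
            y :: PySem.List.slice t none (some ((i:Nat):Int)) := by
          rw [PySem.List.slice_to_natCast, PySem.List.slice_to_natCast]; rfl
        have h2 : PySem.List.slice (y :: t) (some (((i+1 : Nat):Int) + 1)) none =
            PySem.List.slice t (some (((i:Nat):Int) + 1)) none := by
          have e1 : (((i+1 : Nat):Int) + 1) = ((i + 2 : Nat) : Int) := by push_cast; ring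
          have e2 : (((i:Nat):Int) + 1) = ((i + 1 : Nat) : Int) := by push_cast; ring
          rw [e1, e2, PySem.List.slice_from_natCast, PySem.List.slice_from_natCast]
          rfl
        rw [h1, h2]
        simp

-- The two update helpers compute the same pair.
theorem upd_alt_eq (deck hand : List (Int × Int × Int)) (card : Int × Int × Int) :
    upd_alt deck hand card = update_cards deck hand card := by
  unfold upd_alt update_cards
  rw [← idx_splice_eq_remove hand card]
  cases hidx : PySem.List.index? hand card with
  | none => rfl
  | some i =>
    simp only [PySem.List.slice_zero_start, List.append_assoc]

-- A successful update removes exactly one card from play.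
theorem upd_len (deck hand nh nd : List (Int × Int × Int)) (card : Int × Int × Int)
    (h : update_cards deck hand card = some (nh, nd)) :
    nh.length + nd.length + 1 = hand.length + deck.length := by
  unfold update_cards at h
  cases hrem : PySem.List.remove? hand card with
  | none => rw [hrem] at h; cases h
  | some h' =>
    rw [hrem] at h
    have hm : card ∈ hand := by
      by_contra hc
      rw [(PySem.List.remove?_eq_none_iff hand card).mpr hc] at hrem; cases hrem
    rw [PySem.List.remove?_eq_some_erase hand card hm] at hrem
    cases hrem
    cases h
    have hlen1 := List.length_erase_of_mem hm
    have hh : hand.length ≠ 0 := by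
      simp only [ne_eq, List.length_eq_zero_iff]; rintro rfl; cases hm
    have hslice : (PySem.List.slice deck (some 0) (some card.1)).length +
        (PySem.List.slice deck (some card.1) none).length = deck.length := by
      rw [PySem.List.slice_zero_start, PySem.List.slice_some_none]
      have h1 : PySem.List.slice deck none (some card.1) =
          deck.take (PySem.List.clampIdx deck.length card.1) := rfl
      rw [h1]
      have := PySem.List.clampIdx_le deck.length card.1
      simp [List.length_take, List.length_drop]
    simp only [List.length_append]
    omega

-- A's loop is find-first.
theorem firstNeutral_eq_find? (dlen hlen : Nat) (tc : Int) (l : List (Int × Int × Int)) :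
    firstNeutral dlen hlen tc l =
      List.find? (fun card => decide ((0 < card.1 ∨ dlen = 0) ∧
        (0 < card.2.2 ∨ (dlen : Int) + (hlen : Int) < tc))) l := by
  induction l with
  | nil => rfl
  | cons c rest ih =>
    unfold firstNeutral
    rw [List.find?_cons]
    by_cases hc : (0 < c.1 ∨ dlen = 0) ∧ (0 < c.2.2 ∨ (dlen : Int) + (hlen : Int) < tc)
    · rw [if_pos hc]; simp [hc]
    · rw [if_neg hc]
      have hd : decide ((0 < c.1 ∨ dlen = 0) ∧ (0 < c.2.2 ∨ (dlen : Int) + (hlen : Int) < tc)) = false := by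
        simp only [decide_eq_false_iff_not]; exact hc
      rw [hd]
      exact ih

-- Fuel irrelevance: one more unit of fuel changes nothing once fuel covers |deck| + |hand|.
theorem goA_succ : ∀ (f : Nat) (deck hand : List (Int × Int × Int)) (tc : Int),
    deck.length + hand.length ≤ f → goA (f + 1) deck hand tc = goA f deck hand tc := by
  intro f
  induction f with
  | zero =>
    intro deck hand tc hle
    have hh : hand.length = 0 := by omega
    show goA 1 deck hand tc = goA 0 deck hand tc
    simp only [goA]
    rw [if_pos (Or.inr hh)]
  | succ f ih =>
    intro deck hand tc hle
    show goA (f + 1 + 1) deck hand tc = goA (f + 1) deck hand tc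
    conv_lhs => rw [goA]
    conv_rhs => rw [goA]
    dsimp only
    by_cases h0 : tc = 0 ∨ hand.length = 0
    · rw [if_pos h0, if_pos h0]
    · rw [if_neg h0, if_neg h0]
      cases hfn : firstNeutral deck.length hand.length tc hand with
      | some card =>
        dsimp only
        cases hupd : update_cards deck hand card with
        | none => rfl
        | some p =>
          obtain ⟨nh, nd⟩ := p
          have hl := upd_len deck hand nh nd card hupd
          have hle' : nd.length + nh.length ≤ f := by omega
          dsimp only
          rw [ih nd nh (tc - 1 + card.2.2) hle']
      | none =>
        dsimp only
        by_cases hbig : (1 < ((PySem.List.max? hand (fun j => j.1)).getD (0,0,0)).1 +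
              ((PySem.List.max? hand (fun j => j.2.2)).getD (0,0,0)).1 ∧
            1 < ((PySem.List.max? hand (fun j => j.1)).getD (0,0,0)).2.2 +
              ((PySem.List.max? hand (fun j => j.2.2)).getD (0,0,0)).2.2) ∨
          (1 < ((PySem.List.max? hand (fun j => j.1)).getD (0,0,0)).1 +
              ((PySem.List.max? hand (fun j => j.2.2)).getD (0,0,0)).1 ∧
            (hand.length : Int) + (deck.length : Int) < tc) ∨
          (1 < ((PySem.List.max? hand (fun j => j.1)).getD (0,0,0)).2.2 +
              ((PySem.List.max? hand (fun j => j.2.2)).getD (0,0,0)).2.2 ∧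
            deck.length = 0)
        · rw [if_pos hbig, if_pos hbig]
          cases hupd1 : update_cards deck hand ((PySem.List.max? hand (fun j => j.2.2)).getD (0,0,0)) with
          | none => rfl
          | some p1 =>
            obtain ⟨nh1, nd1⟩ := p1
            dsimp only
            cases hupd2 : update_cards nd1 nh1 ((PySem.List.max? hand (fun j => j.1)).getD (0,0,0)) with
            | none => rfl
            | some p2 =>
              obtain ⟨nh2, nd2⟩ := p2
              dsimp only
              have hl1 := upd_len deck hand nh1 nd1 _ hupd1
              have hl2 := upd_len nd1 nh1 nh2 nd2 _ hupd2
              have hle' : nd2.length + nh2.length ≤ f := by omega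
              rw [ih nd2 nh2 _ hle']
        · rw [if_neg hbig, if_neg hbig]
          by_cases hz : ((PySem.List.max? hand (fun j => j.2.2)).getD (0,0,0)).2.2 = 0 ∧
              ((PySem.List.max? hand (fun j => j.1)).getD (0,0,0)).1 = 0
          · rw [if_pos hz, if_pos hz]
          · rw [if_neg hz, if_neg hz]
            have hmap : hand.map (fun card =>
                match update_cards deck hand card with
                | none => 0
                | some (nh, nd) => card.2.1 + goA (f + 1) nd nh (tc - 1 + card.2.2)) =
              hand.map (fun card =>
                match update_cards deck hand card with
                | none => 0
                | some (nh, nd) => card.2.1 + goA f nd nh (tc - 1 + card.2.2)) := by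
              apply List.map_congr_left
              intro card hcard
              cases hupd : update_cards deck hand card with
              | none => rfl
              | some p =>
                obtain ⟨nh, nd⟩ := p
                have hl := upd_len deck hand nh nd card hupd
                have hle' : nd.length + nh.length ≤ f := by omega
                dsimp only
                rw [ih nd nh (tc - 1 + card.2.2) hle']
            rw [hmap]

theorem goA_of_le (f : Nat) (deck hand : List (Int × Int × Int)) (tc : Int)
    (h : deck.length + hand.length ≤ f) :
    goA f deck hand tc = get_best_score deck hand tc := by
  unfold get_best_score
  induction f with
  | zero =>
    have h0 : deck.length + hand.length = 0 := by omega
    rw [h0]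
  | succ f ih =>
    rcases Nat.eq_or_lt_of_le h with heq | hlt
    · rw [heq]
    · have hle : deck.length + hand.length ≤ f := by omega
      rw [goA_succ f deck hand tc hle]
      exact ih hle

-- running strict-improvement fold is the running max
theorem foldmax (g : (Int × Int × Int) → Int) : ∀ (l : List (Int × Int × Int)) (x : Int),
    l.foldl (fun m card => if m < g card then g card else m) x = (l.map g).foldl max x := by
  intro l
  induction l with
  | nil => intro x; rfl
  | cons c rest ih =>
    intro x
    rw [List.map_cons, List.foldl_cons, List.foldl_cons, ih]
    congr 1
    rcases lt_or_ge x (g c) with hlt | hge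
    · rw [if_pos hlt, max_eq_right (le_of_lt hlt)]
    · rw [if_neg (not_lt.mpr hge), max_eq_left hge]

-- once the accumulator is `some`, the option fold is the plain fold
theorem optfold (g : (Int × Int × Int) → Int) : ∀ (l : List (Int × Int × Int)) (x : Int),
    l.foldl (fun acc card =>
      match acc with
      | none => some (g card)
      | some m => some (if m < g card then g card else m)) (some x)
    = some (l.foldl (fun m card => if m < g card then g card else m) x) := by
  intro l
  induction l with
  | nil => intro x; rfl
  | cons c rest ih => intro x; rw [List.foldl_cons, List.foldl_cons]; exact ih _

-- Cache invariant: every stored value is the true score of its state.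
def CacheInv (cache : PySem.Dict (List (Int × Int × Int) × List (Int × Int × Int) × Int) Int) : Prop :=
  ∀ (d h : List (Int × Int × Int)) (t v : Int),
    cache.get? (d, h, t) = some v → v = get_best_score d h t

theorem miss_claim (f : Nat)
    (IH : ∀ (d h : List (Int × Int × Int)) (t : Int)
      (c : PySem.Dict (List (Int × Int × Int) × List (Int × Int × Int) × Int) Int),
      d.length + h.length ≤ f → CacheInv c →
      (goB f d h t c).1 = goA f d h t ∧ CacheInv (goB f d h t c).2)
    (deck hand : List (Int × Int × Int)) (tc : Int)
    (cache : PySem.Dict (List (Int × Int × Int) × List (Int × Int × Int) × Int) Int)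
    (hle : deck.length + hand.length ≤ f + 1) (hinv : CacheInv cache) :
    (goBmiss f deck hand tc cache).1 = goA (f + 1) deck hand tc ∧
      CacheInv (goBmiss f deck hand tc cache).2 := by
  rw [goBmiss, goA]
  dsimp only
  rw [firstNeutral_eq_find? deck.length hand.length tc hand]
  simp only [upd_alt_eq]
  by_cases h0 : tc = 0 ∨ hand.length = 0
  · rw [if_pos h0, if_pos h0]; exact ⟨rfl, hinv⟩
  · rw [if_neg h0, if_neg h0]
    cases hfn : List.find? (fun card => decide ((0 < card.1 ∨ deck.length = 0) ∧
        (0 < card.2.2 ∨ (deck.length : Int) + (hand.length : Int) < tc))) hand with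
    | some card =>
      dsimp only
      cases hupd : update_cards deck hand card with
      | none => exact ⟨rfl, hinv⟩
      | some p =>
        obtain ⟨nh, nd⟩ := p
        dsimp only
        have hl := upd_len deck hand nh nd card hupd
        have hle' : nd.length + nh.length ≤ f := by omega
        obtain ⟨hv, hi⟩ := IH nd nh (tc - 1 + card.2.2) cache hle' hinv
        exact ⟨by rw [hv], hi⟩
    | none =>
      dsimp only
      by_cases hbig : (1 < ((PySem.List.max? hand (fun j => j.1)).getD (0,0,0)).1 +
            ((PySem.List.max? hand (fun j => j.2.2)).getD (0,0,0)).1 ∧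
          1 < ((PySem.List.max? hand (fun j => j.1)).getD (0,0,0)).2.2 +
            ((PySem.List.max? hand (fun j => j.2.2)).getD (0,0,0)).2.2) ∨
        (1 < ((PySem.List.max? hand (fun j => j.1)).getD (0,0,0)).1 +
            ((PySem.List.max? hand (fun j => j.2.2)).getD (0,0,0)).1 ∧
          (hand.length : Int) + (deck.length : Int) < tc) ∨
        (1 < ((PySem.List.max? hand (fun j => j.1)).getD (0,0,0)).2.2 +
            ((PySem.List.max? hand (fun j => j.2.2)).getD (0,0,0)).2.2 ∧
          deck.length = 0)
      · rw [if_pos hbig, if_pos hbig]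
        cases hupd1 : update_cards deck hand ((PySem.List.max? hand (fun j => j.2.2)).getD (0,0,0)) with
        | none => exact ⟨rfl, hinv⟩
        | some p1 =>
          obtain ⟨nh1, nd1⟩ := p1
          dsimp only
          cases hupd2 : update_cards nd1 nh1 ((PySem.List.max? hand (fun j => j.1)).getD (0,0,0)) with
          | none => exact ⟨rfl, hinv⟩
          | some p2 =>
            obtain ⟨nh2, nd2⟩ := p2
            dsimp only
            have hl1 := upd_len deck hand nh1 nd1 _ hupd1
            have hl2 := upd_len nd1 nh1 nh2 nd2 _ hupd2
            have hle' : nd2.length + nh2.length ≤ f := by omega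
            obtain ⟨hv, hi⟩ := IH nd2 nh2 _ cache hle' hinv
            exact ⟨by rw [hv], hi⟩
      · rw [if_neg hbig, if_neg hbig]
        by_cases hz : ((PySem.List.max? hand (fun j => j.2.2)).getD (0,0,0)).2.2 = 0 ∧
            ((PySem.List.max? hand (fun j => j.1)).getD (0,0,0)).1 = 0
        · rw [if_pos hz, if_pos hz]; exact ⟨rfl, hinv⟩
        · rw [if_neg hz, if_neg hz]
          have inner : ∀ (l : List (Int × Int × Int)) (b : Option Int)
              (c : PySem.Dict (List (Int × Int × Int) × List (Int × Int × Int) × Int) Int),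
              CacheInv c →
              (List.foldl (stepB f deck hand tc) (b, c) l).1 =
                List.foldl (fun acc card =>
                  match acc with
                  | none => some (match update_cards deck hand card with
                      | none => (0 : Int)
                      | some (nh, nd) => card.2.1 + goA f nd nh (tc - 1 + card.2.2))
                  | some m => some (if m < (match update_cards deck hand card with
                      | none => (0 : Int)
                      | some (nh, nd) => card.2.1 + goA f nd nh (tc - 1 + card.2.2)) then
                      (match update_cards deck hand card with
                      | none => (0 : Int)
                      | some (nh, nd) => card.2.1 + goA f nd nh (tc - 1 + card.2.2)) else m)) b l ∧
              CacheInv (List.foldl (stepB f deck hand tc) (b, c) l).2 := by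
            intro l
            induction l with
            | nil => intro b c hc; exact ⟨rfl, hc⟩
            | cons card rest ihl =>
              intro b c hc
              rw [List.foldl_cons, List.foldl_cons, stepB]
              simp only [upd_alt_eq]
              cases hupd : update_cards deck hand card with
              | none =>
                cases b <;> (dsimp only; exact ihl _ _ hc)
              | some p =>
                obtain ⟨nh, nd⟩ := p
                have hl := upd_len deck hand nh nd card hupd
                have hle' : nd.length + nh.length ≤ f := by omega
                obtain ⟨hv, hi⟩ := IH nd nh (tc - 1 + card.2.2) c hle' hc
                dsimp only
                simp only [hv]
                cases b <;> (dsimp only; exact ihl _ _ hi)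
          obtain ⟨hfold, hinvf⟩ := inner hand none cache hinv
          refine ⟨?_, hinvf⟩
          dsimp only
          rw [hfold]
          cases hhand : hand with
          | nil => exact absurd (Or.inr (by rw [hhand]; rfl)) h0
          | cons chead crest =>
            rw [List.map_cons, PySem.List.max?_id_cons, List.foldl_cons]
            dsimp only
            rw [optfold (fun card => match update_cards deck (chead :: crest) card with
                  | none => (0 : Int)
                  | some (nh, nd) => card.2.1 + goA f nd nh (tc - 1 + card.2.2)),
                foldmax (fun card => match update_cards deck (chead :: crest) card with
                  | none => (0 : Int)
                  | some (nh, nd) => card.2.1 + goA f nd nh (tc - 1 + card.2.2))]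

theorem memo : ∀ (f : Nat) (deck hand : List (Int × Int × Int)) (tc : Int)
    (cache : PySem.Dict (List (Int × Int × Int) × List (Int × Int × Int) × Int) Int),
    deck.length + hand.length ≤ f → CacheInv cache →
    (goB f deck hand tc cache).1 = goA f deck hand tc ∧ CacheInv (goB f deck hand tc cache).2 := by
  intro f
  induction f with
  | zero => intro d h t c hle hinv; rw [goB]; exact ⟨rfl, hinv⟩
  | succ f ih =>
    intro deck hand tc cache hle hinv
    rw [goB]
    cases hget : cache.get? (deck, hand, tc) with
    | some v =>
      dsimp only
      exact ⟨by rw [hinv deck hand tc v hget, goA_of_le (f+1) deck hand tc hle], hinv⟩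
    | none =>
      dsimp only
      obtain ⟨hv, hi⟩ := miss_claim f ih deck hand tc cache hle hinv
      refine ⟨hv, ?_⟩
      intro d' h' t' v' hget'
      rw [PySem.Dict.get?_insert] at hget'
      by_cases hk : ((d', h', t') : List (Int × Int × Int) × List (Int × Int × Int) × Int) = (deck, hand, tc)
      · rw [if_pos hk] at hget'
        simp only [Prod.mk.injEq] at hk
        obtain ⟨rfl, rfl, rfl⟩ := hk
        cases hget'
        rw [hv, goA_of_le (f+1) d' h' t' hle]
      · rw [if_neg hk] at hget'
        exact hi d' h' t' v' hget'

-- ===== VERDICT (by name: the statement is the Claim_ definition above) =====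
theorem get_best_score_spec : Claim_equal_get_best_score := by
  intro deck hand tc _
  unfold Spec_get_best_score get_best_score get_best_score_alt
  have h := memo (deck.length + hand.length) deck hand tc PySem.Dict.empty le_rfl
    (by intro d h t v hv; simp [PySem.Dict.get?_empty] at hv)
  exact (h.1).symm
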